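-- pv_equiv track=rewrite | github.com/DipeshAmazatic/PySchool | tuples/7_remove_common_elements.py | removeCommonElements
-- ===== SOURCE A (Python) =====
-- def removeCommonElements(t1,t2):
--     re=[]
--     t2=list(t2)
--     for i in t1:
--         if(i not in t2):
--             re.append(i)
--         else:
--             t2.remove(i)
--     return tuple(re+t2)
-- ===== SOURCE B (Python) =====
-- def removeCommonElements(t1, t2):
--     # Count both tuples once, precompute per-element common quotas (multiset
--     # intersection), then emit survivors in two linear passes: t1's surplus
--     # occurrences first, then t2's surviving occurrences.
--     c1 = {}
--     for x in t1:
--         c1[x] = c1.get(x, 0) + 1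
--     c2 = {}
--     for x in t2:
--         c2[x] = c2.get(x, 0) + 1
--     out = []
--     skip1 = {x: min(n, c2.get(x, 0)) for x, n in c1.items()}
--     for x in t1:
--         if skip1.get(x, 0) > 0:
--             skip1[x] = skip1.get(x, 0) - 1
--         else:
--             out.append(x)
--     skip2 = {x: min(c1.get(x, 0), n) for x, n in c2.items()}
--     for x in t2:
--         if skip2.get(x, 0) > 0:
--             skip2[x] = skip2.get(x, 0) - 1
--         else:
--             out.append(x)
--     return tuple(out)
-- ===== Notes on version B (the rewrite author's own statement) =====
-- stated objective: faster
-- what changed: Replaces A's destructive inner scan (membership test + list.remove on a shrinking copy of t2 for every element of t1) with two hash-count tables built once and precomputed common-occurrence quotas, then two linear skip passes over t1 and t2.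
import Mathlib
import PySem

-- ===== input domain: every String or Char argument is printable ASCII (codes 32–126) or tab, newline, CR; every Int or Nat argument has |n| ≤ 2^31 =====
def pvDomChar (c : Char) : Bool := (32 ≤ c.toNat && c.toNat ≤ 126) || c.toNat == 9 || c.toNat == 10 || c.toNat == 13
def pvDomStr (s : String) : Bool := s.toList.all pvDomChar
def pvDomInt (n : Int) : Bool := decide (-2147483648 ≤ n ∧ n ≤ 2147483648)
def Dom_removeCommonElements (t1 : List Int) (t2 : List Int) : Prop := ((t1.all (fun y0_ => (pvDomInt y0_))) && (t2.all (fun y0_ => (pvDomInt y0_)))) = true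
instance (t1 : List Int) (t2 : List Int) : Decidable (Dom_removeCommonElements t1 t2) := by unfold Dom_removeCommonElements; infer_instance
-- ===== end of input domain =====

-- B replaces A's per-element scan-and-remove over a shrinking copy of t2 with counting
-- tables and precomputed common quotas, then two linear skip passes (objective: faster).


-- ===== PORT A =====
-- 're=[]; t2=list(t2); for i in t1: if i not in t2: re.append(i) else: t2.remove(i); return tuple(re+t2)'
-- 't2.remove(i)' is guarded by the membership test, so it equals 'st.2.erase i' here
-- (PySem.List.remove?_eq_some_erase: remove? is 'some (erase)' exactly when the element is present).
def removeCommonElements (t1 : List Int) (t2 : List Int) : List Int :=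
  let s := t1.foldl (fun (st : List Int × List Int) i =>
    if st.2.contains i = false then (st.1 ++ [i], st.2)
    else (st.1, st.2.erase i)) ([], t2)
  s.1 ++ s.2

-- ===== PORT B =====
-- literal transliteration of Source B: build counters c1, c2, the quota dicts skip1/skip2
-- ({x: min(n, c2.get(x,0)) for x, n in c1.items()} as a fold over items), then two passes.
def removeCommonElements_alt (t1 : List Int) (t2 : List Int) : List Int :=
  let c1 : PySem.Dict Int Int := t1.foldl (fun d x => d.insert x (d.getD x 0 + 1)) PySem.Dict.empty
  let c2 : PySem.Dict Int Int := t2.foldl (fun d x => d.insert x (d.getD x 0 + 1)) PySem.Dict.empty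
  let skip1 : PySem.Dict Int Int :=
    c1.items.foldl (fun d p => d.insert p.1 (min p.2 (c2.getD p.1 0))) PySem.Dict.empty
  let s1 := t1.foldl (fun (st : PySem.Dict Int Int × List Int) x =>
    if st.1.getD x 0 > 0 then (st.1.insert x (st.1.getD x 0 - 1), st.2)
    else (st.1, st.2 ++ [x])) (skip1, [])
  let skip2 : PySem.Dict Int Int :=
    c2.items.foldl (fun d p => d.insert p.1 (min (c1.getD p.1 0) p.2)) PySem.Dict.empty
  let s2 := t2.foldl (fun (st : PySem.Dict Int Int × List Int) x =>
    if st.1.getD x 0 > 0 then (st.1.insert x (st.1.getD x 0 - 1), st.2)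
    else (st.1, st.2 ++ [x])) (skip2, s1.2)
  s2.2

-- ===== PRECONDITION & SPEC =====
def Spec_removeCommonElements (t1 : List Int) (t2 : List Int) (out : List Int) : Prop := out = removeCommonElements_alt t1 t2
instance (t1 : List Int) (t2 : List Int) (out : List Int) : Decidable (Spec_removeCommonElements t1 t2 out) := by unfold Spec_removeCommonElements; infer_instance

-- ===== CLAIM (what is proved, stated in full; the proofs are below) =====
def Claim_equal_removeCommonElements : Prop := ∀ (t1 : List Int) (t2 : List Int), Dom_removeCommonElements t1 t2 → Spec_removeCommonElements t1 t2 (removeCommonElements t1 t2)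

-- ===== LEMMAS AND PROOFS =====

-- recursive rendering of A's loop
def rceF : List Int → List Int → List Int
  | [], t2 => t2
  | i :: rest, t2 => if i ∈ t2 then rceF rest (t2.erase i) else i :: rceF rest t2

-- skip pass with a functional quota table K: drop an element while its quota is positive
def skipPass : List Int → (Int → Int) → List Int
  | [], _ => []
  | x :: r, K => if K x > 0 then skipPass r (fun y => if y = x then K y - 1 else K y)
                 else x :: skipPass r K

-- the common-quota table
def rceM (t1 t2 : List Int) : Int → Int := fun x => min ((t1.count x : Int)) ((t2.count x : Int))

theorem rceA_fold (t1 : List Int) : ∀ (acc t2 : List Int),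
    (t1.foldl (fun (st : List Int × List Int) i =>
      if st.2.contains i = false then (st.1 ++ [i], st.2)
      else (st.1, st.2.erase i)) (acc, t2)).1
    ++ (t1.foldl (fun (st : List Int × List Int) i =>
      if st.2.contains i = false then (st.1 ++ [i], st.2)
      else (st.1, st.2.erase i)) (acc, t2)).2
    = acc ++ rceF t1 t2 := by
  induction t1 with
  | nil => intro acc t2; simp [rceF]
  | cons i rest ih =>
    intro acc t2
    simp only [List.foldl_cons]
    by_cases h : i ∈ t2
    · rw [show (if t2.contains i = false then (acc ++ [i], t2) else (acc, t2.erase i))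
            = (acc, t2.erase i) from by simp [h]]
      rw [ih acc (t2.erase i)]
      simp [rceF, h]
    · rw [show (if t2.contains i = false then (acc ++ [i], t2) else (acc, t2.erase i))
            = (acc ++ [i], t2) from by simp [h]]
      rw [ih (acc ++ [i]) t2]
      simp [rceF, h]

theorem skipPass_of_nonpos (l : List Int) : ∀ (K : Int → Int), (∀ x ∈ l, ¬ K x > 0) →
    skipPass l K = l := by
  induction l with
  | nil => intro K _; rfl
  | cons x r ih =>
    intro K h
    have hx : ¬ K x > 0 := h x (by simp)
    simp [skipPass, hx]
    exact ih K (fun y hy => h y (by simp [hy]))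

-- skipping with quota at i ≥ 1 commutes with erasing i's first occurrence
theorem skipPass_erase (l : List Int) : ∀ (K : Int → Int) (i : Int), i ∈ l → 1 ≤ K i →
    skipPass l K = skipPass (l.erase i) (fun y => if y = i then K y - 1 else K y) := by
  induction l with
  | nil => intro K i h; simp at h
  | cons j r ih =>
    intro K i hmem hK
    by_cases hji : j = i
    · subst hji
      have : K j > 0 := by omega
      simp [skipPass, this, List.erase_cons_head]
    · have hir : i ∈ r := by
        rcases List.mem_cons.mp hmem with h | h
        · exact absurd h.symm hji
        · exact h
      rw [List.erase_cons_tail (by simp [hji])]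
      have hij : ¬ i = j := fun hh => hji hh.symm
      by_cases hKj : K j > 0
      · have hcond : (if j = i then K j - 1 else K j) > 0 := by rw [if_neg hji]; exact hKj
        rw [show skipPass (j :: r) K = skipPass r (fun y => if y = j then K y - 1 else K y) from
              by simp [skipPass, hKj]]
        rw [show skipPass (j :: r.erase i) (fun y => if y = i then K y - 1 else K y)
              = skipPass (r.erase i) (fun y => if y = j then (if y = i then K y - 1 else K y) - 1
                  else (if y = i then K y - 1 else K y)) from by simp [skipPass, hcond]]
        rw [ih _ i hir (by simpa [if_neg hij] using hK)]
        congr 1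
        funext y
        by_cases h1 : y = i <;> by_cases h2 : y = j <;> simp [h1, h2, hij, hji]
      · have hcond : ¬ (if j = i then K j - 1 else K j) > 0 := by rw [if_neg hji]; exact hKj
        simp only [skipPass, if_neg hKj, if_neg hcond]
        rw [ih _ i hir hK]

-- core equivalence: A's recursive form is the two skip passes with the min-count table
theorem rceF_eq_skip (t1 : List Int) : ∀ (t2 : List Int),
    rceF t1 t2 = skipPass t1 (rceM t1 t2) ++ skipPass t2 (rceM t1 t2) := by
  induction t1 with
  | nil =>
    intro t2
    have h : skipPass t2 (rceM [] t2) = t2 := by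
      apply skipPass_of_nonpos
      intro x _
      simp [rceM]
    simp [rceF, skipPass, h]
  | cons i rest ih =>
    intro t2
    by_cases hni : i ∈ t2
    case neg =>
      -- i ∉ t2 : quota at i is 0; table for (i::rest) equals table for rest
      have hMeq : rceM (i :: rest) t2 = rceM rest t2 := by
        funext x
        by_cases hx : x = i
        · subst hx
          have h0 : t2.count x = 0 := List.count_eq_zero_of_not_mem hni
          simp only [rceM, h0, List.count_cons_self]
          push_cast
          omega
        · simp [rceM, Ne.symm hx]
      have hM0 : ¬ rceM (i :: rest) t2 i > 0 := by
        have h0 : t2.count i = 0 := List.count_eq_zero_of_not_mem hni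
        simp only [rceM, h0, List.count_cons_self]
        push_cast
        omega
      simp only [rceF, if_neg hni]
      rw [show skipPass (i :: rest) (rceM (i :: rest) t2)
            = i :: skipPass rest (rceM (i :: rest) t2) by simp [skipPass, hM0]]
      rw [hMeq, ih t2]
      simp
    case pos =>
      -- i ∈ t2 : quota at i ≥ 1; decremented table is the table for (rest, t2.erase i)
      have hi2 : i ∈ t2 := hni
      have hc2 : 1 ≤ (t2.count i : Int) := by
        have := List.count_pos_iff.mpr hi2
        omega
      have hK1 : 1 ≤ rceM (i :: rest) t2 i := by
        simp only [rceM, List.count_cons_self]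
        push_cast
        omega
      have hdec : (fun y => if y = i then rceM (i :: rest) t2 y - 1 else rceM (i :: rest) t2 y)
          = rceM rest (t2.erase i) := by
        funext y
        by_cases hy : y = i
        · subst hy
          have herase : ((t2.erase y).count y : Int) = (t2.count y : Int) - 1 := by
            rw [List.count_erase_self]
            omega
          simp only [rceM, List.count_cons_self, herase]
          push_cast
          omega
        · simp [rceM, if_neg hy, List.count_erase_of_ne hy, Ne.symm hy]
      have hpass1 : skipPass (i :: rest) (rceM (i :: rest) t2)
          = skipPass rest (rceM rest (t2.erase i)) := by
        have hpos : rceM (i :: rest) t2 i > 0 := by omega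
        simp only [skipPass, if_pos hpos]
        rw [hdec]
      have hpass2 : skipPass t2 (rceM (i :: rest) t2)
          = skipPass (t2.erase i) (rceM rest (t2.erase i)) := by
        rw [skipPass_erase t2 _ i hi2 hK1, hdec]
      simp only [rceF, if_pos hi2]
      rw [hpass1, hpass2, ih (t2.erase i)]

-- lookup in a dict built by inserting (k, f k) for each k in ks
theorem getD_foldl_insert_fun (ks : List Int) : ∀ (f : Int → Int) (d : PySem.Dict Int Int) (x : Int),
    (ks.foldl (fun d k => d.insert k (f k)) d).getD x 0
      = if x ∈ ks then f x else d.getD x 0 := by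
  induction ks with
  | nil => intro f d x; simp
  | cons k r ih =>
    intro f d x
    simp only [List.foldl_cons, ih]
    by_cases hr : x ∈ r
    · simp [hr]
    · by_cases hk : x = k
      · subst hk; simp [hr]
      · simp [hr, hk, PySem.Dict.getD_insert]

-- the quota dicts of B look up to the min-count table
theorem getD_skipDict (t1 t2 : List Int) (x : Int) :
    ((PySem.Dict.counter t1).items.foldl
        (fun (d : PySem.Dict Int Int) p => d.insert p.1 (min p.2 ((PySem.Dict.counter t2).getD p.1 0)))
        PySem.Dict.empty).getD x 0 = rceM t1 t2 x := by
  rw [PySem.Dict.items_counter, List.foldl_map]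
  have := getD_foldl_insert_fun (PySem.Set.ofList t1)
    (fun k => min ((t1.count k : Int)) ((PySem.Dict.counter t2).getD k 0)) PySem.Dict.empty x
  simp only at this
  rw [this]
  by_cases hx : x ∈ t1
  · simp [PySem.Set.mem_ofList, hx, rceM, PySem.Dict.getD_counter]
  · have h0 : t1.count x = 0 := List.count_eq_zero_of_not_mem hx
    simp [PySem.Set.mem_ofList, hx, rceM, h0]

-- a dict-quota pass is skipPass on its lookup function
theorem pass_eq (l : List Int) : ∀ (d : PySem.Dict Int Int) (acc : List Int),
    (l.foldl (fun (st : PySem.Dict Int Int × List Int) x =>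
      if st.1.getD x 0 > 0 then (st.1.insert x (st.1.getD x 0 - 1), st.2)
      else (st.1, st.2 ++ [x])) (d, acc)).2
    = acc ++ skipPass l (fun y => d.getD y 0) := by
  induction l with
  | nil => intro d acc; simp [skipPass]
  | cons x r ih =>
    intro d acc
    by_cases h : d.getD x 0 > 0
    · simp only [List.foldl_cons, if_pos h, ih]
      have : (fun y => (d.insert x (d.getD x 0 - 1)).getD y 0)
          = (fun y => if y = x then d.getD y 0 - 1 else d.getD y 0) := by
        funext y
        rw [PySem.Dict.getD_insert]
        by_cases hy : y = x <;> simp [hy]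
      simp [skipPass, h, this]
    · simp only [List.foldl_cons, if_neg h, ih]
      simp [skipPass, h]

-- B unfolded: the two skip passes with the min-count table
theorem alt_eq_skip (t1 t2 : List Int) :
    removeCommonElements_alt t1 t2 = skipPass t1 (rceM t1 t2) ++ skipPass t2 (rceM t1 t2) := by
  unfold removeCommonElements_alt
  simp only [PySem.Dict.foldl_insert_getD_add_one_eq_counter]
  rw [pass_eq, pass_eq]
  have h1 : (fun y => ((PySem.Dict.counter t1).items.foldl
      (fun (d : PySem.Dict Int Int) p => d.insert p.1 (min p.2 ((PySem.Dict.counter t2).getD p.1 0)))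
      PySem.Dict.empty).getD y 0) = rceM t1 t2 := by
    funext y; exact getD_skipDict t1 t2 y
  have h2 : (fun y => ((PySem.Dict.counter t2).items.foldl
      (fun (d : PySem.Dict Int Int) p => d.insert p.1 (min ((PySem.Dict.counter t1).getD p.1 0) p.2))
      PySem.Dict.empty).getD y 0) = rceM t1 t2 := by
    funext y
    have := getD_foldl_insert_fun (PySem.Set.ofList t2)
      (fun k => min ((PySem.Dict.counter t1).getD k 0) ((t2.count k : Int))) PySem.Dict.empty y
    rw [PySem.Dict.items_counter, List.foldl_map]
    simp only at this
    rw [this]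
    by_cases hy : y ∈ t2
    · simp [PySem.Set.mem_ofList, hy, rceM, PySem.Dict.getD_counter]
    · have h0 : t2.count y = 0 := List.count_eq_zero_of_not_mem hy
      simp [PySem.Set.mem_ofList, hy, rceM, h0]
  rw [h1, h2]
  simp

-- ===== VERDICT (by name: the statement is the Claim_ definition above) =====
theorem removeCommonElements_spec : Claim_equal_removeCommonElements := by
  intro t1 t2 _
  unfold Spec_removeCommonElements removeCommonElements
  simp only
  rw [rceA_fold t1 [] t2, alt_eq_skip, ← rceF_eq_skip]
  simp
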